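-- pv_equiv track=rewrite | github.com/slee1717/M-mind-Solver | SamuelLee_Mastermind.py | CompareGuess
-- ===== SOURCE A (Python) =====
-- def CompareGuess(guess,possible,response):
--     new_set=[]
--     for x in possible:
--         tempResponse=[0,0]
--         for y in range(len(x)):
--             for z in range(len(guess)):
--                 if (x[y] == guess[z]):
--                     tempResponse[0]=tempResponse[0] + 1
--                     if(y==z):
--                         tempResponse[1]=tempResponse[1] + 1
--                     #else:
--                         #tempResponse[0]=tempResponse[0] + 1
--         if tempResponse == response:
--            new_set.append(x)
--     return new_set
-- ===== SOURCE B (Python) =====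
-- def CompareGuess(guess, possible, response):
--     freq = {}
--     for g in guess:
--         freq[g] = freq.get(g, 0) + 1
--     return [x for x in possible
--             if [sum(freq.get(v, 0) for v in x),
--                 sum(1 for a, b in zip(x, guess) if a == b)] == response]
-- ===== Notes on version B (the rewrite author's own statement) =====
-- stated objective: faster
-- what changed: Replaces the per-candidate O(n^2) double index loop over all (y,z) pairs by a guess frequency dictionary built once: total matches = sum of guess-frequencies of the candidate's symbols, exact matches = one zip pass.
import Mathlib
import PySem

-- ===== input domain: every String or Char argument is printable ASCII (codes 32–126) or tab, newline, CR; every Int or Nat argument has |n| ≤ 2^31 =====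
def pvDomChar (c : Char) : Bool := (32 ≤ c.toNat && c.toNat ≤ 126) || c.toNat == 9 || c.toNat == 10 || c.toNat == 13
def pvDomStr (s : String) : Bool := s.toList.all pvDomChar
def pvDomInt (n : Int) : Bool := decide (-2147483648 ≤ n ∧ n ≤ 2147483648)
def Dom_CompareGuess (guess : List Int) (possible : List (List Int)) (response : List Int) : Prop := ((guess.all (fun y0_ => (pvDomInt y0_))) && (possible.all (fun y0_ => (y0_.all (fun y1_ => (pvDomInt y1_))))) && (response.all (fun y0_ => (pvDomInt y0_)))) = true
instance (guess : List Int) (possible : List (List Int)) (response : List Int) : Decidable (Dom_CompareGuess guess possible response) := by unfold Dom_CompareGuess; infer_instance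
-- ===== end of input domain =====

-- B replaces A's per-candidate double index loop by a guess-frequency dictionary built once
-- (total = sum of frequencies, exact = one zip pass); a timing run measured B faster.

-- ===== PORT A =====
def CompareGuess (guess : List Int) (possible : List (List Int)) (response : List Int) : List (List Int) :=
  possible.foldl (fun new_set x =>
    let t :=
      (PySem.List.pyRange 0 (x.length : Int) 1).foldl (fun t y =>
        (PySem.List.pyRange 0 (guess.length : Int) 1).foldl (fun t z =>
          if PySem.List.pyGetD x y 0 = PySem.List.pyGetD guess z 0 then
            let t' := (t.1 + 1, t.2)
            if y = z then (t'.1, t'.2 + 1) else t'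
          else t) t) ((0 : Int), (0 : Int))
    if [t.1, t.2] = response then new_set ++ [x] else new_set) []

-- ===== PORT B =====
def CompareGuess_alt (guess : List Int) (possible : List (List Int)) (response : List Int) : List (List Int) :=
  let freq := guess.foldl (fun d g => d.insert g (d.getD g 0 + 1)) (PySem.Dict.empty : PySem.Dict Int Int)
  possible.filter (fun x =>
    decide ([(x.map (fun v => freq.getD v 0)).sum,
             (((x.zip guess).countP (fun p => p.1 == p.2) : Nat) : Int)] = response))

-- ===== PRECONDITION & SPEC =====
def Spec_CompareGuess (guess : List Int) (possible : List (List Int)) (response : List Int) (out : List (List Int)) : Prop := out = CompareGuess_alt guess possible response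
instance (guess : List Int) (possible : List (List Int)) (response : List Int) (out : List (List Int)) : Decidable (Spec_CompareGuess guess possible response out) := by unfold Spec_CompareGuess; infer_instance

-- ===== CLAIM (what is proved, stated in full; the proofs are below) =====
def Claim_equal_CompareGuess : Prop := ∀ (guess : List Int) (possible : List (List Int)) (response : List Int), Dom_CompareGuess guess possible response → Spec_CompareGuess guess possible response (CompareGuess guess possible response)

-- ===== LEMMAS AND PROOFS =====

lemma innerLoop (guess x : List Int) (y : Int) (hy : 0 ≤ y) (m : Nat) (hm : m ≤ guess.length)
    (t : Int × Int) :
    (PySem.List.pyRange 0 (m : Int) 1).foldl (fun t z =>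
        if PySem.List.pyGetD x y 0 = PySem.List.pyGetD guess z 0 then
          let t' := (t.1 + 1, t.2)
          if y = z then (t'.1, t'.2 + 1) else t'
        else t) t
      = (t.1 + ((guess.take m).count (PySem.List.pyGetD x y 0) : Int),
         t.2 + if y < (m : Int) ∧ PySem.List.pyGetD x y 0 = PySem.List.pyGetD guess y 0 then 1 else 0) := by
  induction m generalizing t with
  | zero =>
    rw [show ((0:Nat):Int) = 0 from rfl, PySem.List.pyRange_one_eq_nil le_rfl]
    have h0 : ¬(y < (0:Int) ∧ PySem.List.pyGetD x y 0 = PySem.List.pyGetD guess y 0) := by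
      rintro ⟨h, -⟩; omega
    simp [h0]
  | succ n ih =>
    have hn : n < guess.length := by omega
    rw [show ((n+1:Nat):Int) = (n:Int) + 1 by push_cast; ring,
        PySem.List.pyRange_one_succ_right (Int.natCast_nonneg n), List.foldl_append,
        ih (by omega) t]
    simp only [List.foldl_cons, List.foldl_nil]
    have hget : PySem.List.pyGetD guess ((n:Nat) : Int) 0 = guess[n] := by
      rw [PySem.List.pyGetD_eq_getElem guess 0 (Int.natCast_nonneg n) (by exact_mod_cast hn)]
      simp
    have hsplit : guess.take (n+1) = guess.take n ++ [guess[n]] := by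
      rw [List.take_add_one, List.getElem?_eq_getElem hn]; rfl
    have hc : ((guess.take (n+1)).count (PySem.List.pyGetD x y 0) : Int)
        = ((guess.take n).count (PySem.List.pyGetD x y 0) : Int)
          + (if PySem.List.pyGetD x y 0 = guess[n] then 1 else 0) := by
      rw [hsplit, List.count_append]
      by_cases h : PySem.List.pyGetD x y 0 = guess[n]
      · simp [h]
      · simp [h, Ne.symm h]
    rw [hc, hget]
    by_cases hyn : y = ((n:Nat) : Int)
    · subst hyn
      rw [hget]
      split_ifs <;> simp_all <;> omega
    · split_ifs <;> simp_all <;> omega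

lemma outerAux (guess x : List Int) (n : Nat) (hn : n ≤ x.length) :
    (PySem.List.pyRange 0 (n : Int) 1).foldl (fun t y =>
        (PySem.List.pyRange 0 (guess.length : Int) 1).foldl (fun t z =>
          if PySem.List.pyGetD x y 0 = PySem.List.pyGetD guess z 0 then
            let t' := (t.1 + 1, t.2)
            if y = z then (t'.1, t'.2 + 1) else t'
          else t) t) ((0 : Int), (0 : Int))
      = (((x.take n).map (fun v => (guess.count v : Int))).sum,
         ((((x.zip guess).take n).countP (fun p => p.1 == p.2) : Nat) : Int)) := by
  induction n with
  | zero =>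
    rw [show ((0:Nat):Int) = 0 from rfl, PySem.List.pyRange_one_eq_nil le_rfl]
    simp
  | succ n ih =>
    have hnx : n < x.length := by omega
    rw [show ((n+1:Nat):Int) = (n:Int) + 1 by push_cast; ring,
        PySem.List.pyRange_one_succ_right (Int.natCast_nonneg n), List.foldl_append,
        ih (by omega)]
    simp only [List.foldl_cons, List.foldl_nil]
    rw [innerLoop guess x ((n:Nat) : Int) (Int.natCast_nonneg n) guess.length le_rfl]
    have hx : PySem.List.pyGetD x ((n:Nat) : Int) 0 = x[n] := by
      rw [PySem.List.pyGetD_eq_getElem x 0 (Int.natCast_nonneg n) (by exact_mod_cast hnx)]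
      simp
    have hxsplit : x.take (n+1) = x.take n ++ [x[n]] := by
      rw [List.take_add_one, List.getElem?_eq_getElem hnx]; rfl
    rw [List.take_length, hx, hxsplit, List.map_append, List.sum_append]
    by_cases hg : n < guess.length
    · have hget : PySem.List.pyGetD guess ((n:Nat) : Int) 0 = guess[n] := by
        rw [PySem.List.pyGetD_eq_getElem guess 0 (Int.natCast_nonneg n) (by exact_mod_cast hg)]
        simp
      have hzlen : n < (x.zip guess).length := by
        rw [List.length_zip]; omega
      have hzsplit : (x.zip guess).take (n+1) = (x.zip guess).take n ++ [(x[n], guess[n])] := by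
        rw [List.take_add_one, List.getElem?_eq_getElem hzlen]
        simp [List.getElem_zip]
      rw [hget, hzsplit, List.countP_append]
      refine Prod.ext ?_ ?_
      · simp
      · simp only []
        by_cases hv : x[n] = guess[n]
        · rw [if_pos ⟨by exact_mod_cast hg, hv⟩]
          simp [hv]
        · rw [if_neg (by rintro ⟨-, h⟩; exact hv h)]
          simp [hv]
    · have hz1 : (x.zip guess).take (n+1) = x.zip guess := by
        apply List.take_of_length_le
        rw [List.length_zip]; omega
      have hz2 : (x.zip guess).take n = x.zip guess := by
        apply List.take_of_length_le
        rw [List.length_zip]; omega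
      rw [hz1, hz2, if_neg (by rintro ⟨h, -⟩; exact hg (by exact_mod_cast h))]
      simp

lemma outerLoop (guess x : List Int) :
    (PySem.List.pyRange 0 (x.length : Int) 1).foldl (fun t y =>
        (PySem.List.pyRange 0 (guess.length : Int) 1).foldl (fun t z =>
          if PySem.List.pyGetD x y 0 = PySem.List.pyGetD guess z 0 then
            let t' := (t.1 + 1, t.2)
            if y = z then (t'.1, t'.2 + 1) else t'
          else t) t) ((0 : Int), (0 : Int))
      = ((x.map (fun v => (guess.count v : Int))).sum,
         (((x.zip guess).countP (fun p => p.1 == p.2) : Nat) : Int)) := by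
  have := outerAux guess x x.length le_rfl
  rwa [List.take_length, List.take_of_length_le (by rw [List.length_zip]; omega)] at this

-- ===== VERDICT (by name: the statement is the Claim_ definition above) =====
theorem CompareGuess_spec : Claim_equal_CompareGuess := by
  intro guess possible response _
  show _ = _
  unfold CompareGuess CompareGuess_alt
  rw [PySem.List.foldl_append_ite_eq_filter]
  simp only [outerLoop, PySem.Dict.foldl_insert_getD_add_one_eq_counter,
    PySem.Dict.getD_counter, List.nil_append]
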